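-- pv_equiv track=rewrite | github.com/BuildThingsThatBuildthings/ai-acceleration-sales-dashboard | execution/audit_all_crm_rows.py | categorize_severity
-- ===== SOURCE A (Python) =====
-- def categorize_severity(issues):
--     """Categorize issues by severity."""
--     severity = 'OK'
--
--     for category, _ in issues['problems']:
--         if category == 'NAME':
--             severity = 'CRITICAL'
--             break
--         elif category == 'EMAIL' and severity != 'CRITICAL':
--             severity = 'HIGH'
--         elif category in ['SUBJECT', 'HOOK'] and severity not in ['CRITICAL', 'HIGH']:
--             severity = 'MEDIUM'
--
--     return severity
-- ===== SOURCE B (Python) =====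
-- def categorize_severity(issues):
--     """Categorize issues by severity."""
--     cats = {category for category, _ in issues['problems']}
--     if 'NAME' in cats:
--         return 'CRITICAL'
--     if 'EMAIL' in cats:
--         return 'HIGH'
--     if cats & {'SUBJECT', 'HOOK'}:
--         return 'MEDIUM'
--     return 'OK'
-- ===== Notes on version B (the rewrite author's own statement) =====
-- stated objective: simpler
-- what changed: Replaces the single pass with a mutable severity accumulator and break by collecting the set of present categories once and resolving severity with independent membership tests in priority order.
import Mathlib
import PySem

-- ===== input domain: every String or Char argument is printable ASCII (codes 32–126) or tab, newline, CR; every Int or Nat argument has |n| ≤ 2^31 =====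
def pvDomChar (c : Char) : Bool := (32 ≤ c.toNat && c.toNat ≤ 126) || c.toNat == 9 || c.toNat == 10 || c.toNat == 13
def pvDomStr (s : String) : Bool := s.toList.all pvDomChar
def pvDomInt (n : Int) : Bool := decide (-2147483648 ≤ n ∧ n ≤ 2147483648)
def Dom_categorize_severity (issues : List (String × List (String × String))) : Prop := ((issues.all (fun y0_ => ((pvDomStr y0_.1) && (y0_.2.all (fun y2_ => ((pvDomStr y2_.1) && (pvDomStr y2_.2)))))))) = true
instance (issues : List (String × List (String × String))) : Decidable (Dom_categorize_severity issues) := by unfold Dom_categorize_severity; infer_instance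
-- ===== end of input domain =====

-- B collects the set of present categories once, then resolves severity by membership tests in
-- priority order, replacing A's single pass with a mutable severity accumulator and break (simpler).

-- ===== PORT A =====
-- the for-loop of A: `severity` is the accumulator, returning "CRITICAL" models the break
def pvLoopA : List (String × String) → String → String
  | [], sev => sev
  | (category, _) :: rest, sev =>
      if category == "NAME" then "CRITICAL"
      else if category == "EMAIL" && !(sev == "CRITICAL") then pvLoopA rest "HIGH"
      else if (category == "SUBJECT" || category == "HOOK")
              && !(sev == "CRITICAL" || sev == "HIGH") then pvLoopA rest "MEDIUM"
      else pvLoopA rest sev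

def categorize_severity (issues : List (String × List (String × String))) : String :=
  pvLoopA ((PySem.Dict.mk issues).getD "problems" []) "OK"

-- ===== PORT B =====
def categorize_severity_alt (issues : List (String × List (String × String))) : String :=
  let cats : PySem.Set String :=
    PySem.Set.ofList (((PySem.Dict.mk issues).getD "problems" []).map (fun p => p.1))
  if PySem.Set.contains cats "NAME" then "CRITICAL"
  else if PySem.Set.contains cats "EMAIL" then "HIGH"
  else if !(PySem.Set.inter cats (PySem.Set.ofList ["SUBJECT", "HOOK"])).isEmpty then "MEDIUM"
  else "OK"

-- ===== PRECONDITION & SPEC =====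
-- A (and B) raise KeyError when the dict has no 'problems' key; Pre_ excludes exactly those inputs.
def Pre_categorize_severity (issues : List (String × List (String × String))) : Prop :=
  (PySem.Dict.mk issues).contains "problems" = true
instance (issues : List (String × List (String × String))) : Decidable (Pre_categorize_severity issues) := by unfold Pre_categorize_severity; infer_instance

def pvWitness_categorize_severity : (List (String × List (String × String))) :=
  [("problems", [("EMAIL", "bad email"), ("HOOK", "weak hook")])]

def Spec_categorize_severity (issues : List (String × List (String × String))) (out : String) : Prop := out = categorize_severity_alt issues
instance (issues : List (String × List (String × String))) (out : String) : Decidable (Spec_categorize_severity issues out) := by unfold Spec_categorize_severity; infer_instance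

-- ===== CLAIM (what is proved, stated in full; the proofs are below) =====
def Claim_equal_categorize_severity : Prop := ∀ (issues : List (String × List (String × String))), Dom_categorize_severity issues → Pre_categorize_severity issues → Spec_categorize_severity issues (categorize_severity issues)

-- ===== LEMMAS AND PROOFS =====

-- characterization of A's loop for the reachable accumulator values
theorem pvLoopA_char (ps : List (String × String)) :
    ∀ sev : String, sev = "OK" ∨ sev = "MEDIUM" ∨ sev = "HIGH" →
    pvLoopA ps sev =
      if "NAME" ∈ ps.map Prod.fst then "CRITICAL"
      else if "EMAIL" ∈ ps.map Prod.fst ∨ sev = "HIGH" then "HIGH"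
      else if "SUBJECT" ∈ ps.map Prod.fst ∨ "HOOK" ∈ ps.map Prod.fst ∨ sev = "MEDIUM" then "MEDIUM"
      else sev := by
  induction ps with
  | nil =>
      intro sev hsev
      rcases hsev with h | h | h <;> subst h <;> simp [pvLoopA]
  | cons hd tl ih =>
      intro sev hsev
      obtain ⟨c, msg⟩ := hd
      by_cases hn : c = "NAME"
      · subst hn; simp [pvLoopA]
      · by_cases he : c = "EMAIL"
        · subst he
          have hne : ¬ sev = "CRITICAL" := by rcases hsev with h | h | h <;> simp [h]
          rw [show pvLoopA (("EMAIL", msg) :: tl) sev = pvLoopA tl "HIGH" by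
                simp [pvLoopA, hne]]
          rw [ih "HIGH" (Or.inr (Or.inr rfl))]
          by_cases hN : "NAME" ∈ List.map Prod.fst tl <;> simp [hN, List.mem_cons]
        · by_cases hsh : c = "SUBJECT" ∨ c = "HOOK"
          · by_cases hhigh : sev = "HIGH"
            · have : pvLoopA ((c, msg) :: tl) sev = pvLoopA tl sev := by
                rcases hsh with h | h <;> subst h <;> simp [pvLoopA, hhigh]
              rw [this, ih sev hsev]
              rcases hsh with h | h <;> subst h <;>
                by_cases hN : "NAME" ∈ List.map Prod.fst tl <;> simp [hN, List.mem_cons, hhigh]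
            · have hmed : sev = "OK" ∨ sev = "MEDIUM" := by
                rcases hsev with h | h | h
                · exact Or.inl h
                · exact Or.inr h
                · exact absurd h hhigh
              have hnc : ¬ sev = "CRITICAL" := by rcases hmed with h | h <;> simp [h]
              have : pvLoopA ((c, msg) :: tl) sev = pvLoopA tl "MEDIUM" := by
                rcases hsh with h | h <;> subst h <;> simp [pvLoopA, hnc, hhigh]
              rw [this, ih "MEDIUM" (Or.inr (Or.inl rfl))]
              rcases hsh with h | h <;> subst h <;>
                by_cases hN : "NAME" ∈ List.map Prod.fst tl <;>
                by_cases hE : "EMAIL" ∈ List.map Prod.fst tl <;>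
                simp [hN, hE, List.mem_cons, hhigh]
          · rw [not_or] at hsh
            have : pvLoopA ((c, msg) :: tl) sev = pvLoopA tl sev := by
              simp [pvLoopA, hn, he, hsh.1, hsh.2]
            rw [this, ih sev hsev]
            by_cases hN : "NAME" ∈ List.map Prod.fst tl <;>
            by_cases hE : "EMAIL" ∈ List.map Prod.fst tl <;>
            by_cases hS : "SUBJECT" ∈ List.map Prod.fst tl <;>
            by_cases hH : "HOOK" ∈ List.map Prod.fst tl <;>
            simp [hN, hE, hS, hH, List.mem_cons, Ne.symm hn, Ne.symm he, Ne.symm hsh.1, Ne.symm hsh.2]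

-- the truthiness of `cats & {'SUBJECT','HOOK'}` in B, as plain membership in the category list
theorem pv_inter_nonempty (l : List String) :
    (!(PySem.Set.inter (PySem.Set.ofList l) (PySem.Set.ofList ["SUBJECT", "HOOK"])).isEmpty)
      = ("SUBJECT" ∈ l ∨ "HOOK" ∈ l : Bool) := by
  rcases h : (PySem.Set.inter (PySem.Set.ofList l) (PySem.Set.ofList ["SUBJECT", "HOOK"])).isEmpty with _ | _
  · rw [List.isEmpty_eq_false_iff_exists_mem] at h
    obtain ⟨y, hy⟩ := h
    rw [PySem.Set.mem_inter, PySem.Set.mem_ofList, PySem.Set.mem_ofList] at hy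
    simp only [List.mem_cons, List.not_mem_nil, or_false] at hy
    rcases hy with ⟨hyl, h1 | h2⟩
    · subst h1; simp [hyl]
    · subst h2; simp [hyl]
  · rw [List.isEmpty_iff] at h
    have hs : "SUBJECT" ∉ l := by
      intro hm
      have : "SUBJECT" ∈ PySem.Set.inter (PySem.Set.ofList l) (PySem.Set.ofList ["SUBJECT", "HOOK"]) := by
        rw [PySem.Set.mem_inter, PySem.Set.mem_ofList, PySem.Set.mem_ofList]; simp [hm]
      simp [h] at this
    have hh : "HOOK" ∉ l := by
      intro hm
      have : "HOOK" ∈ PySem.Set.inter (PySem.Set.ofList l) (PySem.Set.ofList ["SUBJECT", "HOOK"]) := by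
        rw [PySem.Set.mem_inter, PySem.Set.mem_ofList, PySem.Set.mem_ofList]; simp [hm]
      simp [h] at this
    simp [hs, hh]

-- ===== VERDICT (by name: the statement is the Claim_ definition above) =====
theorem categorize_severity_spec : Claim_equal_categorize_severity := by
  intro issues _ _
  unfold Spec_categorize_severity categorize_severity categorize_severity_alt
  set ps := (PySem.Dict.mk issues).getD "problems" [] with hps
  rw [pvLoopA_char ps "OK" (Or.inl rfl)]
  have hcontains : ∀ x : String,
      PySem.Set.contains (PySem.Set.ofList (ps.map (fun p => p.1))) x = (x ∈ ps.map Prod.fst : Bool) := by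
    intro x
    simp [PySem.Set.contains_eq_listContains, PySem.Set.mem_ofList]
  simp only [hcontains, pv_inter_nonempty]
  by_cases h1 : "NAME" ∈ ps.map Prod.fst
  · simp [h1]
  · by_cases h2 : "EMAIL" ∈ ps.map Prod.fst
    · simp [h1, h2]
    · by_cases h3 : "SUBJECT" ∈ ps.map Prod.fst ∨ "HOOK" ∈ ps.map Prod.fst
      · rcases h3 with h | h <;> simp [h1, h2, h]
      · rw [not_or] at h3
        simp [h1, h2, h3.1, h3.2]
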